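-- pv_equiv track=rewrite | github.com/pypi-data/pypi-mirror-1 | packages/searchform/searchform-0.1.0.tar.gz/searchform-0.1.0/searchform/forms.py | sanitize_filters
-- ===== SOURCE A (Python) =====
-- def sanitize_filters(filters):
--     """Fix filters by merging related keys
--
--     For example, for this input:
--
--     {'name.operator': 'contains', 'name': 'foo'}
--
--     it produces this output:
--     {'name__contains': 'foo'}
--     """
--     new_filters = {}
--     keys_to_remove = []
--     for k, v in filters.items():
--         if '.' in k:
--             field = k.split('.')[0]
--             operator = v
--             new_key = str('%s__%s' % (field, operator))
--             value = filters[field]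
--             if value:
--                 new_filters[new_key] = value
--
--             keys_to_remove.append(field)
--             if field in new_filters:
--                 del new_filters[field]
--
--         elif k not in keys_to_remove and v:
--             new_filters[k] = v
--
--     return new_filters
-- ===== SOURCE B (Python) =====
-- def sanitize_filters(filters):
--     """Fix filters by merging related keys (same contract as the original,
--     done in one pass over a precomputed set of operator-annotated fields)."""
--     fields_with_ops = {k.split('.')[0] for k in filters if '.' in k}
--     new_filters = {}
--     for k, v in filters.items():
--         if '.' in k:
--             field = k.split('.')[0]
--             value = filters[field]
--             if value:
--                 new_filters['%s__%s' % (field, v)] = value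
--         elif k not in fields_with_ops and v:
--             new_filters[k] = v
--     return new_filters
-- ===== Notes on version B (the rewrite author's own statement) =====
-- stated objective: simpler
-- what changed: B precomputes the set of operator-annotated fields once and builds the result in a single stateless pass, eliminating A's keys_to_remove list and its add-then-conditionally-delete bookkeeping.
import Mathlib
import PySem

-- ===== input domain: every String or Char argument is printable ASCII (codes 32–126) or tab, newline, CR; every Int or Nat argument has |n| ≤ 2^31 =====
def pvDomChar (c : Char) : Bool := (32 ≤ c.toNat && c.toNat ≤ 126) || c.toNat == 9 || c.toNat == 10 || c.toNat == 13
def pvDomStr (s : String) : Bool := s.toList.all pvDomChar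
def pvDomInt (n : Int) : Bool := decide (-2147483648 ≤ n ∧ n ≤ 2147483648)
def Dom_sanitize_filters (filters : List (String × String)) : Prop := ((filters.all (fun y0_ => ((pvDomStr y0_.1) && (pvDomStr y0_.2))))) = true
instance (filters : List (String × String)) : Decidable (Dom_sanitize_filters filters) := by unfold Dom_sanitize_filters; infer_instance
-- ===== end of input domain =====

-- B replaces A's stateful keys_to_remove list and add-then-conditionally-delete bookkeeping by one
-- precomputed set of operator-annotated fields and a single stateless filtering pass (objective: simpler).
-- The equivalence is about the RETURN value; neither version mutates its argument.

-- ===== PORT A =====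
-- shared transliterations of the Python expressions «'.' in k» and «k.split('.')[0]»
def pvDotted (k : String) : Bool := PySem.Str.isIn "." k
def pvField (k : String) : String := ((PySem.Str.split? k ".").getD []).headD ""

-- one iteration of A's loop; state = (new_filters, keys_to_remove)
def pvStepA (filters : List (String × String))
    (st : PySem.Dict String String × List String) (kv : String × String) :
    PySem.Dict String String × List String :=
  if pvDotted kv.1 then
    let field := pvField kv.1
    let new_key := field ++ "__" ++ kv.2
    match (PySem.Dict.mk filters).get? field with   -- filters[field]; none = KeyError, excluded by Pre_
    | none => st
    | some value =>
      let nf := if value ≠ "" then st.1.insert new_key value else st.1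
      let ktr := st.2 ++ [field]
      let nf := if nf.contains field then nf.erase field else nf
      (nf, ktr)
  else if kv.1 ∉ st.2 ∧ kv.2 ≠ "" then (st.1.insert kv.1 kv.2, st.2)
  else st

def sanitize_filters (filters : List (String × String)) : List (String × String) :=
  (filters.foldl (pvStepA filters) (PySem.Dict.empty, [])).1.items

-- ===== PORT B =====
-- B's set comprehension {k.split('.')[0] for k in filters if '.' in k}
def pvOps (filters : List (String × String)) : PySem.Set String :=
  PySem.Set.ofList ((filters.filter (fun kv => pvDotted kv.1)).map (fun kv => pvField kv.1))

-- one iteration of B's loop; state = new_filters only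
def pvStepB (filters : List (String × String)) (ops : PySem.Set String)
    (nf : PySem.Dict String String) (kv : String × String) : PySem.Dict String String :=
  if pvDotted kv.1 then
    match (PySem.Dict.mk filters).get? (pvField kv.1) with   -- filters[field]; none = KeyError, excluded by Pre_
    | none => nf
    | some value =>
      if value ≠ "" then nf.insert (pvField kv.1 ++ "__" ++ kv.2) value else nf
  else if ¬ PySem.Set.contains ops kv.1 ∧ kv.2 ≠ "" then nf.insert kv.1 kv.2
  else nf

def sanitize_filters_alt (filters : List (String × String)) : List (String × String) :=
  (filters.foldl (pvStepB filters (pvOps filters)) PySem.Dict.empty).items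

-- ===== PRECONDITION & SPEC =====
-- Pre_ excludes: (a) inputs where some dotted key's field prefix is not a key of filters — there A (and B) raise KeyError;
-- (b) the corner where a merged key field__operator coincides with the field prefix of another dotted key —
--     there A's add-then-delete bookkeeping may delete the merged entry depending on iteration order, an
--     accidental order-dependent behaviour no caller would specify either way (see claim.json cites).
def Pre_sanitize_filters (filters : List (String × String)) : Prop :=
  (∀ kv ∈ filters, pvDotted kv.1 = true → pvField kv.1 ∈ filters.map Prod.fst) ∧
  (∀ kv ∈ filters, ∀ kw ∈ filters, pvDotted kv.1 = true → pvDotted kw.1 = true →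
      pvField kv.1 ++ "__" ++ kv.2 ≠ pvField kw.1)
instance (filters : List (String × String)) : Decidable (Pre_sanitize_filters filters) := by
  unfold Pre_sanitize_filters; infer_instance

def pvWitness_sanitize_filters : (List (String × String)) :=
  [("name.operator", "contains"), ("name", "foo"), ("year", "1999"), ("empty", "")]

def Spec_sanitize_filters (filters : List (String × String)) (out : List (String × String)) : Prop := out = sanitize_filters_alt filters
instance (filters : List (String × String)) (out : List (String × String)) : Decidable (Spec_sanitize_filters filters out) := by unfold Spec_sanitize_filters; infer_instance

-- ===== CLAIM (what is proved, stated in full; the proofs are below) =====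
def Claim_equal_sanitize_filters : Prop := ∀ (filters : List (String × String)), Dom_sanitize_filters filters → Pre_sanitize_filters filters → Spec_sanitize_filters filters (sanitize_filters filters)

-- ===== LEMMAS AND PROOFS =====

-- fields of the dotted keys of l, in order
def pvFields (l : List (String × String)) : List String :=
  (l.filter (fun kv => pvDotted kv.1)).map (fun kv => pvField kv.1)

-- B's running dict is A's with the entries keyed by an operator-annotated field filtered away
def pvFilterD (ops : List String) (d : PySem.Dict String String) : PySem.Dict String String :=
  PySem.Dict.mk (d.items.filter (fun e => !decide (e.1 ∈ ops)))

theorem pv_any_filter_false (ops : List String) (l : List (String × String)) (k : String)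
    (hc : l.any (fun p => p.1 == k) = false) :
    (l.filter (fun e => !decide (e.1 ∈ ops))).any (fun p => p.1 == k) = false := by
  cases h2 : (l.filter (fun e => !decide (e.1 ∈ ops))).any (fun p => p.1 == k) with
  | false => rfl
  | true =>
    obtain ⟨p, hp, hpk⟩ := List.any_eq_true.mp h2
    have : l.any (fun p => p.1 == k) = true := List.any_eq_true.mpr ⟨p, (List.mem_filter.mp hp).1, hpk⟩
    rw [hc] at this; exact absurd this (by simp)

theorem pvFilterD_insert_of_not_mem (ops : List String) (d : PySem.Dict String String)
    (k : String) (v : String) (hk : k ∉ ops) :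
    pvFilterD ops (d.insert k v) = (pvFilterD ops d).insert k v := by
  unfold pvFilterD PySem.Dict.insert PySem.Dict.contains
  cases hc : d.items.any (fun p => p.1 == k) with
  | true =>
    have hc' : (d.items.filter (fun e => !decide (e.1 ∈ ops))).any (fun p => p.1 == k) = true := by
      obtain ⟨p, hp, hpk⟩ := List.any_eq_true.mp hc
      refine List.any_eq_true.mpr ⟨p, List.mem_filter.mpr ⟨hp, ?_⟩, hpk⟩
      have : p.1 = k := by simpa using hpk
      simp [this, hk]
    simp only [hc', if_true, List.filter_map]
    congr 1
    rw [List.filter_congr (l := d.items)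
      (p := (fun e => !decide (e.1 ∈ ops)) ∘ fun p => if (p.1 == k) = true then (k, v) else p)
      (q := fun e => !decide (e.1 ∈ ops)) (fun p _hp => ?_)]
    by_cases h : p.1 = k
    · simp [h, hk]
    · simp [h]
  | false =>
    have hc' := pv_any_filter_false ops d.items k hc
    simp [hc', List.filter_append, hk]

theorem pvFilterD_insert_of_mem (ops : List String) (d : PySem.Dict String String)
    (k : String) (v : String) (hk : k ∈ ops) :
    pvFilterD ops (d.insert k v) = pvFilterD ops d := by
  unfold pvFilterD PySem.Dict.insert PySem.Dict.contains
  cases hc : d.items.any (fun p => p.1 == k) with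
  | true =>
    simp only [if_true, List.filter_map]
    congr 1
    rw [List.filter_congr (l := d.items)
      (p := (fun e => !decide (e.1 ∈ ops)) ∘ fun p => if (p.1 == k) = true then (k, v) else p)
      (q := fun e => !decide (e.1 ∈ ops)) (fun p _hp => by by_cases h : p.1 = k <;> simp [h, hk])]
    rw [List.map_congr_left (fun p hp => ?_), List.map_id]
    have hq := (List.mem_filter.mp hp).2
    have : p.1 ≠ k := by
      intro hh; rw [hh] at hq; simp [hk] at hq
    simp [this]
  | false =>
    simp [List.filter_append, hk]

theorem pvFilterD_erase_of_mem (ops : List String) (d : PySem.Dict String String)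
    (k : String) (hk : k ∈ ops) :
    pvFilterD ops (d.erase k) = pvFilterD ops d := by
  unfold pvFilterD PySem.Dict.erase
  simp only [PySem.Dict.items, List.filter_filter]
  congr 1
  refine List.filter_congr (fun p _hp => ?_)
  by_cases h : p.1 = k
  · simp [h, hk]
  · simp [h]

theorem pvFilterD_eq_self (ops : List String) (d : PySem.Dict String String)
    (h : ∀ e ∈ d.items, e.1 ∉ ops) : pvFilterD ops d = d := by
  unfold pvFilterD
  cases d with | mk items => exact congrArg PySem.Dict.mk ((List.filter_eq_self).mpr (fun e he => by simp [h e he]))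

theorem pv_mem_pvFields {x : String} {l : List (String × String)} :
    x ∈ pvFields l ↔ ∃ kw ∈ l, pvDotted kw.1 = true ∧ pvField kw.1 = x := by
  constructor
  · intro hx
    obtain ⟨kw, hkw, rfl⟩ := List.mem_map.mp hx
    obtain ⟨h1, h2⟩ := List.mem_filter.mp hkw
    exact ⟨kw, h1, by simpa using h2, rfl⟩
  · rintro ⟨kw, h1, h2, rfl⟩
    exact List.mem_map.mpr ⟨kw, List.mem_filter.mpr ⟨h1, by simpa using h2⟩, rfl⟩

theorem pvFields_cons (kv : String × String) (l : List (String × String)) :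
    pvFields (kv :: l) = if pvDotted kv.1 then pvField kv.1 :: pvFields l else pvFields l := by
  by_cases h : pvDotted kv.1 <;> simp [pvFields, h]

theorem pvFields_append (l₁ l₂ : List (String × String)) :
    pvFields (l₁ ++ l₂) = pvFields l₁ ++ pvFields l₂ := by
  simp [pvFields]

theorem pvLoop (filters : List (String × String)) (ops : PySem.Set String)
    (hops : ∀ x, x ∈ ops ↔ x ∈ pvFields filters)
    (hpre2 : ∀ kv ∈ filters, pvDotted kv.1 = true → pvField kv.1 ∈ filters.map Prod.fst)
    (hpre3 : ∀ kv ∈ filters, ∀ kw ∈ filters, pvDotted kv.1 = true → pvDotted kw.1 = true →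
      pvField kv.1 ++ "__" ++ kv.2 ≠ pvField kw.1) :
    ∀ (r p : List (String × String)) (nf : PySem.Dict String String) (ktr : List String),
      filters = p ++ r →
      ktr = pvFields p →
      (∀ e ∈ nf.items, e.1 ∈ ops → e.1 ∈ pvFields r) →
      (r.foldl (pvStepA filters) (nf, ktr)).1 = r.foldl (pvStepB filters ops) (pvFilterD ops nf) := by
  intro r
  induction r with
  | nil =>
    intro p nf ktr _ _ hinv
    simpa using (pvFilterD_eq_self ops nf (fun e he hm =>
      by simpa [pvFields] using hinv e he hm)).symm
  | cons kv r' ih =>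
    intro p nf ktr hsplit hktr hinv
    simp only [List.foldl_cons]
    by_cases hd : pvDotted kv.1 = true
    · -- dotted key
      have hkvmem : kv ∈ filters := by
        rw [hsplit]; exact List.mem_append_right _ (List.mem_cons_self ..)
      have hfmem : pvField kv.1 ∈ filters.map Prod.fst := hpre2 kv hkvmem hd
      obtain ⟨value, hval⟩ : ∃ v, (PySem.Dict.mk filters).get? (pvField kv.1) = some v := by
        have : ((PySem.Dict.mk filters).get? (pvField kv.1)).isSome = true := by
          unfold PySem.Dict.get?
          rw [Option.isSome_map]
          refine List.find?_isSome.mpr ?_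
          obtain ⟨e, he, hek⟩ := List.mem_map.mp hfmem
          exact ⟨e, he, by simp [hek]⟩
        exact Option.isSome_iff_exists.mp this
      have hfops : pvField kv.1 ∈ ops :=
        (hops _).mpr (pv_mem_pvFields.mpr ⟨kv, hkvmem, hd, rfl⟩)
      have hnk : (pvField kv.1 ++ "__" ++ kv.2) ∉ ops := by
        intro hmem
        obtain ⟨kw, hkw, hkwd, hkwf⟩ := pv_mem_pvFields.mp ((hops _).mp hmem)
        exact hpre3 kv hkvmem kw hkw hd hkwd hkwf.symm
      -- names for the intermediate states
      set nf1 := (if value ≠ "" then nf.insert (pvField kv.1 ++ "__" ++ kv.2) value else nf) with hnf1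
      set nf2 := (if nf1.contains (pvField kv.1) then nf1.erase (pvField kv.1) else nf1) with hnf2
      have hstepA : pvStepA filters (nf, ktr) kv = (nf2, ktr ++ [pvField kv.1]) := by
        simp only [pvStepA, hd, if_true, hval]
        rw [← hnf1, ← hnf2]
      have hstepB : pvStepB filters ops (pvFilterD ops nf) kv = pvFilterD ops nf2 := by
        have h2 : pvFilterD ops nf2 = pvFilterD ops nf1 := by
          rw [hnf2]; split
          · exact pvFilterD_erase_of_mem ops nf1 _ hfops
          · rfl
        have h1 : pvFilterD ops nf1 = if value ≠ "" then (pvFilterD ops nf).insert (pvField kv.1 ++ "__" ++ kv.2) value else pvFilterD ops nf := by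
          rw [hnf1]; split
          · exact pvFilterD_insert_of_not_mem ops nf _ _ hnk
          · rfl
        simp only [pvStepB, hd, if_true, hval, h2, h1]
      rw [hstepA, hstepB]
      refine ih (p ++ [kv]) nf2 (ktr ++ [pvField kv.1]) (by simp [hsplit]) ?_ ?_
      · rw [hktr, pvFields_append]; simp [pvFields, hd]
      · intro e he hm
        have hne : e.1 ≠ pvField kv.1 := by
          rw [hnf2] at he
          by_cases hc : nf1.contains (pvField kv.1) = true
          · rw [if_pos hc] at he
            unfold PySem.Dict.erase at he
            have := (List.mem_filter.mp he).2
            simpa using this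
          · rw [if_neg hc] at he
            intro hh
            exact hc (List.any_eq_true.mpr ⟨e, he, by simp [hh]⟩)
        have he1 : e ∈ nf1.items := by
          rw [hnf2] at he
          split at he
          · exact (List.mem_filter.mp (by exact he)).1
          · exact he
        have he0 : e ∈ nf.items := by
          rw [hnf1] at he1
          split at he1
          · rcases (PySem.Dict.mem_items_insert nf _ _ e).mp he1 with h | h
            · exact absurd hm (by rw [h] at hm ⊢; exact fun _ => hnk hm)
            · exact h.1
          · exact he1
        have := hinv e he0 hm
        rw [pvFields_cons, if_pos hd] at this
        rcases List.mem_cons.mp this with h | h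
        · exact absurd h hne
        · exact h
    · -- plain key
      by_cases hv : kv.2 = ""
      · have hstepA : pvStepA filters (nf, ktr) kv = (nf, ktr) := by
          simp [pvStepA, hd, hv]
        have hstepB : pvStepB filters ops (pvFilterD ops nf) kv = pvFilterD ops nf := by
          simp [pvStepB, hd, hv]
        rw [hstepA, hstepB]
        refine ih (p ++ [kv]) nf ktr (by simp [hsplit]) ?_ ?_
        · rw [hktr, pvFields_append]; simp [pvFields, hd]
        · intro e he hm
          have := hinv e he hm
          rwa [pvFields_cons, if_neg hd] at this
      · by_cases hk : kv.1 ∈ ops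
        · -- B skips; A may insert a doomed entry
          have hstepB : pvStepB filters ops (pvFilterD ops nf) kv = pvFilterD ops nf := by
            have hc : PySem.Set.contains ops kv.1 = true := by
              simpa [PySem.Set.contains, List.contains_iff_mem] using hk
            simp [pvStepB, hd, hc]
            intro h
            exact absurd hk h
          by_cases hktrm : kv.1 ∈ ktr
          · have hstepA : pvStepA filters (nf, ktr) kv = (nf, ktr) := by
              simp [pvStepA, hd, hktrm]
            rw [hstepA, hstepB]
            refine ih (p ++ [kv]) nf ktr (by simp [hsplit]) ?_ ?_
            · rw [hktr, pvFields_append]; simp [pvFields, hd]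
            · intro e he hm
              have := hinv e he hm
              rwa [pvFields_cons, if_neg hd] at this
          · have hstepA : pvStepA filters (nf, ktr) kv = (nf.insert kv.1 kv.2, ktr) := by
              simp [pvStepA, hd, hktrm, hv]
            rw [hstepA, hstepB, ← pvFilterD_insert_of_mem ops nf kv.1 kv.2 hk]
            refine ih (p ++ [kv]) (nf.insert kv.1 kv.2) ktr (by simp [hsplit]) ?_ ?_
            · rw [hktr, pvFields_append]; simp [pvFields, hd]
            · intro e he hm
              rcases (PySem.Dict.mem_items_insert nf _ _ e).mp he with h | h
              · -- the doomed entry: its key has a dotted partner later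
                rw [h]; rw [h] at hm; simp only
                have : kv.1 ∈ pvFields filters := (hops _).mp hk
                rw [hsplit, pvFields_append, pvFields_cons, if_neg hd] at this
                rcases List.mem_append.mp this with hh | hh
                · exact absurd (hktr ▸ hh) hktrm
                · exact hh
              · have := hinv e h.1 hm
                rwa [pvFields_cons, if_neg hd] at this
        · -- both insert
          have hktrm : kv.1 ∉ ktr := by
            intro hh
            refine hk ((hops _).mpr ?_)
            rw [hsplit, pvFields_append]
            exact List.mem_append_left _ (hktr ▸ hh)
          have hstepA : pvStepA filters (nf, ktr) kv = (nf.insert kv.1 kv.2, ktr) := by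
            simp [pvStepA, hd, hktrm, hv]
          have hstepB : pvStepB filters ops (pvFilterD ops nf) kv = (pvFilterD ops nf).insert kv.1 kv.2 := by
            have hc : PySem.Set.contains ops kv.1 = false := by
              simp [PySem.Set.contains, List.contains_iff_mem, hk]
            simp [pvStepB, hd, hc, hv]
            intro h
            exact absurd h hk
          rw [hstepA, hstepB, ← pvFilterD_insert_of_not_mem ops nf kv.1 kv.2 hk]
          refine ih (p ++ [kv]) (nf.insert kv.1 kv.2) ktr (by simp [hsplit]) ?_ ?_
          · rw [hktr, pvFields_append]; simp [pvFields, hd]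
          · intro e he hm
            rcases (PySem.Dict.mem_items_insert nf _ _ e).mp he with h | h
            · exact absurd hm (by rw [h] at hm ⊢; exact fun _ => hk hm)
            · have := hinv e h.1 hm
              rwa [pvFields_cons, if_neg hd] at this


-- ===== VERDICT (by name: the statement is the Claim_ definition above) =====
theorem sanitize_filters_spec : Claim_equal_sanitize_filters := by
  intro filters _hdom hpre
  obtain ⟨hpre2, hpre3⟩ := hpre
  unfold Spec_sanitize_filters sanitize_filters sanitize_filters_alt
  have h := pvLoop filters (pvOps filters)
    (fun x => by simp [pvOps, pvFields, PySem.Set.mem_ofList])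
    hpre2 hpre3 filters [] PySem.Dict.empty [] (by simp) (by simp [pvFields]) (by simp [PySem.Dict.empty])
  have he : pvFilterD (pvOps filters) PySem.Dict.empty = PySem.Dict.empty := rfl
  rw [he] at h
  rw [h]
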